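-- pv_equiv track=rewrite | github.com/NEBainer/Ejercicios_proyectos_UTN | Programacion 1/Matrices/practica_matrices.py | mostrar_recaudacion_linea
-- ===== SOURCE A (Python) =====
-- def mostrar_recaudacion_linea(matriz: list) -> list:
--     acumulador_primer_linea = 0
--     acumulador_segunda_linea = 0
--     acumulador_tercera_linea = 0
--
--     for i in range(len(matriz)):
--         for j in range(len(matriz[i])):
--             if i == 0:
--                 acumulador_primer_linea += int(matriz[i][j])
--             elif i == 1:
--                 acumulador_segunda_linea += int(matriz[i][j])
--             else:
--                 acumulador_tercera_linea += int(matriz[i][j])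
--     resultado = "Recaudacion por linea:\n"
--     resultado += f"Linea 1: {acumulador_primer_linea}\n"
--     resultado += f"Linea 2: {acumulador_segunda_linea}\n"
--     resultado += f"Linea 3: {acumulador_tercera_linea}\n"
--     return resultado
-- ===== SOURCE B (Python) =====
-- def mostrar_recaudacion_linea(matriz: list) -> list:
--     total = sum(int(x) for fila in matriz for x in fila)
--     linea1 = sum(int(x) for x in matriz[0]) if len(matriz) > 0 else 0
--     linea2 = sum(int(x) for x in matriz[1]) if len(matriz) > 1 else 0
--     lineas = [linea1, linea2, total - linea1 - linea2]
--     return "Recaudacion por linea:\n" + "".join(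
--         f"Linea {k}: {v}\n" for k, v in enumerate(lineas, 1)
--     )
-- ===== Notes on version B (the rewrite author's own statement) =====
-- stated objective: alternative
-- what changed: Computes the grand total of all elements and obtains line 3 by subtraction (total - linea1 - linea2) instead of accumulating it, and builds the report by joining over enumerate(lineas, 1) instead of sequential string appends.
import Mathlib
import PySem

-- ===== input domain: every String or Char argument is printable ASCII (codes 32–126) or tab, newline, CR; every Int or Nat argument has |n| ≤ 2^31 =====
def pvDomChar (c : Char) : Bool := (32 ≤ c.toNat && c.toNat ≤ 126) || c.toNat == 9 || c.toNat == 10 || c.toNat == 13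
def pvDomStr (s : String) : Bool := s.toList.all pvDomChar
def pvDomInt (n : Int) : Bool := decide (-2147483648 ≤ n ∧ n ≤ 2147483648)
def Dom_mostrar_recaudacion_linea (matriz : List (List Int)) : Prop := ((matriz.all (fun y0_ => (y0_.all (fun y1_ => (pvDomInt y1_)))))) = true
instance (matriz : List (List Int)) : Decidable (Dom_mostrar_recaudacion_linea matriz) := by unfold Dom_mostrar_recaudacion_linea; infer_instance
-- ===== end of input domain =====

-- B computes line 3 by subtracting the first two line sums from the grand total of all
-- elements (instead of accumulating it) and renders via join over enumerate; objective: alternative.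


-- ===== PORT A =====
-- literal transliteration of A: nested index loops over range(len(...)), three
-- accumulators updated by branching on the outer index i, then the report string.
def mostrar_recaudacion_linea (matriz : List (List Int)) : String :=
  let st :=
    (PySem.List.pyRange 0 (matriz.length : Int) 1).foldl
      (fun (acc : Int × Int × Int) i =>
        let row := PySem.List.pyGetD matriz i []
        (PySem.List.pyRange 0 (row.length : Int) 1).foldl
          (fun (acc2 : Int × Int × Int) j =>
            let v := PySem.List.pyGetD row j 0
            if i == 0 then (acc2.1 + v, acc2.2.1, acc2.2.2)
            else if i == 1 then (acc2.1, acc2.2.1 + v, acc2.2.2)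
            else (acc2.1, acc2.2.1, acc2.2.2 + v)) acc)
      (0, 0, 0)
  let resultado := "Recaudacion por linea:\n"
  let resultado := resultado ++ "Linea 1: " ++ PySem.Int.toStr st.1 ++ "\n"
  let resultado := resultado ++ "Linea 2: " ++ PySem.Int.toStr st.2.1 ++ "\n"
  let resultado := resultado ++ "Linea 3: " ++ PySem.Int.toStr st.2.2 ++ "\n"
  resultado

-- ===== PORT B =====
-- literal transliteration of B: grand total over the flattened matrix, lines 1 and 2
-- directly, line 3 by subtraction; report via join over enumerate(lineas, 1).
def mostrar_recaudacion_linea_alt (matriz : List (List Int)) : String :=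
  let total : Int := (matriz.flatMap (fun fila => fila)).sum
  let linea1 : Int := if 0 < matriz.length then (PySem.List.pyGetD matriz 0 []).sum else 0
  let linea2 : Int := if 1 < matriz.length then (PySem.List.pyGetD matriz 1 []).sum else 0
  let lineas : List Int := [linea1, linea2, total - linea1 - linea2]
  "Recaudacion por linea:\n" ++
    String.join (lineas.zipIdx.map
      (fun p => "Linea " ++ PySem.Int.toStr ((p.2 : Int) + 1) ++ ": " ++ PySem.Int.toStr p.1 ++ "\n"))

-- ===== PRECONDITION & SPEC =====
def Spec_mostrar_recaudacion_linea (matriz : List (List Int)) (out : String) : Prop := out = mostrar_recaudacion_linea_alt matriz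
instance (matriz : List (List Int)) (out : String) : Decidable (Spec_mostrar_recaudacion_linea matriz out) := by unfold Spec_mostrar_recaudacion_linea; infer_instance

-- ===== CLAIM (what is proved, stated in full; the proofs are below) =====
def Claim_equal_mostrar_recaudacion_linea : Prop := ∀ (matriz : List (List Int)), Dom_mostrar_recaudacion_linea matriz → Spec_mostrar_recaudacion_linea matriz (mostrar_recaudacion_linea matriz)

-- ===== LEMMAS AND PROOFS =====

-- A's inner loop when the outer index is 0: accumulates the row into the first slot.
theorem pv_fold_fst (r : List Int) (a b c : Int) :
    r.foldl (fun (acc : Int × Int × Int) v => (acc.1 + v, acc.2.1, acc.2.2)) (a, b, c)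
      = (a + r.sum, b, c) := by
  induction r generalizing a with
  | nil => simp
  | cons x xs ih => simp [ih, add_assoc]

-- A's inner loop when the outer index is 1: accumulates the row into the second slot.
theorem pv_fold_snd (r : List Int) (a b c : Int) :
    r.foldl (fun (acc : Int × Int × Int) v => (acc.1, acc.2.1 + v, acc.2.2)) (a, b, c)
      = (a, b + r.sum, c) := by
  induction r generalizing b with
  | nil => simp
  | cons x xs ih => simp [ih, add_assoc]

-- A's inner loop when the outer index is ≥ 2: accumulates the row into the third slot.
theorem pv_fold_thd (r : List Int) (a b c : Int) :
    r.foldl (fun (acc : Int × Int × Int) v => (acc.1, acc.2.1, acc.2.2 + v)) (a, b, c)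
      = (a, b, c + r.sum) := by
  induction r generalizing c with
  | nil => simp
  | cons x xs ih => simp [ih, add_assoc]

-- A's inner loop over one row, for a fixed outer index k, in one statement.
theorem pv_inner (k : Int) (row : List Int) (acc : Int × Int × Int) :
    (PySem.List.pyRange 0 (row.length : Int) 1).foldl
      (fun (acc2 : Int × Int × Int) j =>
        if k == 0 then (acc2.1 + PySem.List.pyGetD row j 0, acc2.2.1, acc2.2.2)
        else if k == 1 then (acc2.1, acc2.2.1 + PySem.List.pyGetD row j 0, acc2.2.2)
        else (acc2.1, acc2.2.1, acc2.2.2 + PySem.List.pyGetD row j 0)) acc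
      = if k == 0 then (acc.1 + row.sum, acc.2.1, acc.2.2)
        else if k == 1 then (acc.1, acc.2.1 + row.sum, acc.2.2)
        else (acc.1, acc.2.1, acc.2.2 + row.sum) := by
  by_cases h0 : k = 0
  · simp only [h0]
    rw [show ((0 : Int) == 0) = true by decide]
    simp only [if_true]
    rw [PySem.List.foldl_pyRange_zero_pyGetD' row 0
      (fun (acc2 : Int × Int × Int) v => (acc2.1 + v, acc2.2.1, acc2.2.2)) acc]
    exact pv_fold_fst row acc.1 acc.2.1 acc.2.2
  · by_cases h1 : k = 1
    · simp only [h1]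
      rw [show ((1 : Int) == 0) = false by decide, show ((1 : Int) == 1) = true by decide]
      simp only [Bool.false_eq_true, if_false, if_true]
      rw [PySem.List.foldl_pyRange_zero_pyGetD' row 0
        (fun (acc2 : Int × Int × Int) v => (acc2.1, acc2.2.1 + v, acc2.2.2)) acc]
      exact pv_fold_snd row acc.1 acc.2.1 acc.2.2
    · rw [show (k == 0) = false by simp [h0], show (k == 1) = false by simp [h1]]
      simp only [Bool.false_eq_true, if_false]
      rw [PySem.List.foldl_pyRange_zero_pyGetD' row 0
        (fun (acc2 : Int × Int × Int) v => (acc2.1, acc2.2.1, acc2.2.2 + v)) acc]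
      exact pv_fold_thd row acc.1 acc.2.1 acc.2.2

-- A's outer loop from index i ≥ 2 on: every remaining row lands in the third slot.
theorem pv_outer_tail (matriz : List (List Int)) :
    ∀ (d i : Nat), matriz.length - i = d → 2 ≤ i → ∀ (a b c : Int),
    (PySem.List.pyRange (i : Int) (matriz.length : Int) 1).foldl
      (fun (acc : Int × Int × Int) k =>
        (PySem.List.pyRange 0 ((PySem.List.pyGetD matriz k []).length : Int) 1).foldl
          (fun (acc2 : Int × Int × Int) j =>
            if k == 0 then (acc2.1 + PySem.List.pyGetD (PySem.List.pyGetD matriz k []) j 0, acc2.2.1, acc2.2.2)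
            else if k == 1 then (acc2.1, acc2.2.1 + PySem.List.pyGetD (PySem.List.pyGetD matriz k []) j 0, acc2.2.2)
            else (acc2.1, acc2.2.1, acc2.2.2 + PySem.List.pyGetD (PySem.List.pyGetD matriz k []) j 0)) acc)
      (a, b, c)
      = (a, b, c + ((matriz.drop i).map List.sum).sum) := by
  intro d
  induction d with
  | zero =>
      intro i hd hi a b c
      rw [PySem.List.pyRange_one_eq_nil (by exact_mod_cast Nat.le_of_sub_eq_zero hd)]
      simp [List.drop_eq_nil_of_le (by omega : matriz.length ≤ i)]
  | succ m ih =>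
      intro i hd hi a b c
      have hlt : i < matriz.length := by omega
      rw [PySem.List.pyRange_one_cons (by exact_mod_cast hlt)]
      rw [List.foldl_cons]
      rw [pv_inner (i : Int) (PySem.List.pyGetD matriz (i : Int) []) (a, b, c)]
      rw [show ((i : Int) == 0) = false by simp; omega,
          show ((i : Int) == 1) = false by simp; omega]
      simp only [Bool.false_eq_true, if_false]
      rw [PySem.List.pyGetD_ofNat matriz i [] hlt]
      rw [show ((i : Int) + 1) = ((i + 1 : Nat) : Int) by push_cast; ring]
      rw [ih (i + 1) (by omega) (by omega) a b (c + (matriz[i]).sum)]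
      have hml : i < (List.map List.sum matriz).length := by simpa using hlt
      simp [add_assoc, List.drop_eq_getElem_cons hml]

-- the whole accumulator triple of A, characterised.
theorem pv_triple (matriz : List (List Int)) :
    (PySem.List.pyRange 0 (matriz.length : Int) 1).foldl
      (fun (acc : Int × Int × Int) i =>
        (PySem.List.pyRange 0 ((PySem.List.pyGetD matriz i []).length : Int) 1).foldl
          (fun (acc2 : Int × Int × Int) j =>
            if i == 0 then (acc2.1 + PySem.List.pyGetD (PySem.List.pyGetD matriz i []) j 0, acc2.2.1, acc2.2.2)
            else if i == 1 then (acc2.1, acc2.2.1 + PySem.List.pyGetD (PySem.List.pyGetD matriz i []) j 0, acc2.2.2)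
            else (acc2.1, acc2.2.1, acc2.2.2 + PySem.List.pyGetD (PySem.List.pyGetD matriz i []) j 0)) acc)
      (0, 0, 0)
      = (((matriz.map List.sum).getD 0 0),
         ((matriz.map List.sum).getD 1 0),
         (((matriz.drop 2).map List.sum).sum)) := by
  match matriz with
  | [] => simp [PySem.List.pyRange_one_eq_nil]
  | [r0] =>
      simp only [List.length_cons, List.length_nil]
      rw [show ((0 + 1 : Nat) : Int) = 1 by norm_num]
      rw [PySem.List.pyRange_one_cons (by norm_num : (0:Int) < 1)]
      rw [show (0 + 1 : Int) = 1 by ring, PySem.List.pyRange_one_eq_nil (le_refl 1)]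
      rw [List.foldl_cons, List.foldl_nil]
      show (PySem.List.pyRange 0 ((PySem.List.pyGetD [r0] (0:Int) []).length : Int) 1).foldl _ _ = _
      rw [pv_inner 0 (PySem.List.pyGetD [r0] (0:Int) []) (0, 0, 0)]
      simp [PySem.List.pyGetD_zero_cons]
  | r0 :: r1 :: rest =>
      have h2 : (2 : Int) ≤ ((r0 :: r1 :: rest).length : Int) := by
        simp; omega
      rw [PySem.List.pyRange_one_cons (by omega : (0:Int) < ((r0 :: r1 :: rest).length : Int))]
      rw [show (0 + 1 : Int) = 1 by ring]
      rw [PySem.List.pyRange_one_cons (by omega : (1:Int) < ((r0 :: r1 :: rest).length : Int))]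
      rw [show (1 + 1 : Int) = ((2 : Nat) : Int) by norm_num]
      rw [List.foldl_cons, List.foldl_cons]
      show (PySem.List.pyRange 2 _ 1).foldl _
        ((PySem.List.pyRange 0 ((PySem.List.pyGetD (r0 :: r1 :: rest) (1:Int) []).length : Int) 1).foldl _
          ((PySem.List.pyRange 0 ((PySem.List.pyGetD (r0 :: r1 :: rest) (0:Int) []).length : Int) 1).foldl _ (0,0,0))) = _
      rw [pv_inner 0 (PySem.List.pyGetD (r0 :: r1 :: rest) (0:Int) []) (0, 0, 0)]
      rw [pv_inner 1 (PySem.List.pyGetD (r0 :: r1 :: rest) (1:Int) [])]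
      have hget1 : PySem.List.pyGetD (r0 :: r1 :: rest) (1:Int) [] = r1 := by
        have h := PySem.List.pyGetD_ofNat (r0 :: r1 :: rest) 1 [] (by simp)
        simpa using h
      simp only [show ((0 : Int) == 0) = true by decide, show ((1 : Int) == 0) = false by decide,
        show ((1 : Int) == 1) = true by decide, if_true, Bool.false_eq_true, if_false]
      rw [PySem.List.pyGetD_zero_cons, hget1]
      have houter := pv_outer_tail (r0 :: r1 :: rest) ((r0 :: r1 :: rest).length - 2) 2 rfl
        (le_refl 2) (0 + r0.sum) (0 + r1.sum) 0
      rw [show (((2:Nat)):Int) = (2:Int) by norm_num] at houter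
      rw [houter]
      simp

-- B's rendered string, unfolded: the join over enumerate equals A's append chain shape.
theorem pv_render (a b c : Int) :
    "Recaudacion por linea:\n" ++
      String.join (([a, b, c] : List Int).zipIdx.map
        (fun p => "Linea " ++ PySem.Int.toStr ((p.2 : Int) + 1) ++ ": " ++ PySem.Int.toStr p.1 ++ "\n"))
    = "Recaudacion por linea:\n" ++ "Linea 1: " ++ PySem.Int.toStr a ++ "\n"
        ++ "Linea 2: " ++ PySem.Int.toStr b ++ "\n"
        ++ "Linea 3: " ++ PySem.Int.toStr c ++ "\n" := by
  have h1 : PySem.Int.toStr (((0 : Nat) : Int) + 1) = "1" := by decide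
  have h2 : PySem.Int.toStr (((1 : Nat) : Int) + 1) = "2" := by decide
  have h3 : PySem.Int.toStr (((2 : Nat) : Int) + 1) = "3" := by decide
  simp only [List.zipIdx, List.map, String.join, List.foldl, h1, h2, h3]
  rw [← String.toList_inj]
  simp only [String.toList_append]
  rw [show ("Linea 1: ").toList = ("Linea ").toList ++ ("1").toList ++ (": ").toList from by decide,
      show ("Linea 2: ").toList = ("Linea ").toList ++ ("2").toList ++ (": ").toList from by decide,
      show ("Linea 3: ").toList = ("Linea ").toList ++ ("3").toList ++ (": ").toList from by decide]
  simp [List.append_assoc]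

-- ===== VERDICT (by name: the statement is the Claim_ definition above) =====
theorem mostrar_recaudacion_linea_spec : Claim_equal_mostrar_recaudacion_linea := by
  intro matriz _
  show mostrar_recaudacion_linea matriz = mostrar_recaudacion_linea_alt matriz
  simp only [mostrar_recaudacion_linea, mostrar_recaudacion_linea_alt]
  rw [pv_triple matriz]
  have e1 : (matriz.map List.sum).getD 0 0
      = (if 0 < matriz.length then (PySem.List.pyGetD matriz 0 []).sum else 0) := by
    cases matriz with
    | nil => simp
    | cons r t => simp [PySem.List.pyGetD_zero_cons]
  have e2 : (matriz.map List.sum).getD 1 0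
      = (if 1 < matriz.length then (PySem.List.pyGetD matriz 1 []).sum else 0) := by
    match matriz with
    | [] => simp
    | [r] => simp
    | r0 :: r1 :: t =>
      have h1' : PySem.List.pyGetD (r0 :: r1 :: t) (1 : Int) [] = r1 := by
        simpa using PySem.List.pyGetD_ofNat (r0 :: r1 :: t) 1 [] (by simp)
      simp only [List.length_cons, if_pos (by omega : 1 < t.length + 1 + 1), h1']
      simp
  have e3 : ((matriz.drop 2).map List.sum).sum
      = (matriz.flatMap (fun fila => fila)).sum
        - (if 0 < matriz.length then (PySem.List.pyGetD matriz 0 []).sum else 0)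
        - (if 1 < matriz.length then (PySem.List.pyGetD matriz 1 []).sum else 0) := by
    have hfl : (matriz.flatMap (fun fila => fila)).sum = (matriz.map List.sum).sum := by
      rw [show (fun (fila : List Int) => fila) = id from rfl, List.flatMap_id, List.sum_flatten]
    match matriz with
    | [] => simp
    | [r] => simp [PySem.List.pyGetD_zero_cons]
    | r0 :: r1 :: t =>
      have h1' : PySem.List.pyGetD (r0 :: r1 :: t) (1 : Int) [] = r1 := by
        simpa using PySem.List.pyGetD_ofNat (r0 :: r1 :: t) 1 [] (by simp)
      simp only [List.length_cons, if_pos (by omega : 0 < t.length + 1 + 1),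
        if_pos (by omega : 1 < t.length + 1 + 1), PySem.List.pyGetD_zero_cons, h1', hfl]
      simp only [List.map_cons, List.sum_cons, List.drop_succ_cons, List.drop_zero]
      ring
  rw [e1, e2, ← e3]
  exact (pv_render _ _ _).symm
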